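-- pv_equiv track=rewrite | github.com/seongjin96/Programmers | Level 2/짝지어 제거하기.py | solution
-- ===== SOURCE A (Python) =====
-- def solution(s):
--     stack = []
--     for ch in s:
--         if not stack:
--             stack.append(ch)
--         else:
--             if stack[-1] == ch:
--                 stack.pop()
--             else:
--                 stack.append(ch)
--
--     if not stack:
--         return 1
--     else:
--         return 0
-- ===== SOURCE B (Python) =====
-- def solution(s):
--     # Repeatedly collapse adjacent equal pairs (left-to-right, non-overlapping)
--     # until a fixpoint; the string fully reduces iff the fixpoint is empty.
--     while True:
--         out = []
--         i = 0
--         n = len(s)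
--         while i < n:
--             if i + 1 < n and s[i] == s[i + 1]:
--                 i += 2
--             else:
--                 out.append(s[i])
--                 i += 1
--         t = ''.join(out)
--         if len(t) == len(s):
--             break
--         s = t
--     return 1 if s == '' else 0
-- ===== Notes on version B (the rewrite author's own statement) =====
-- stated objective: alternative
-- what changed: Replaces the single-pass stack reduction with repeated left-to-right collapsing of adjacent equal pairs to a fixpoint, then tests emptiness.
import Mathlib
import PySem

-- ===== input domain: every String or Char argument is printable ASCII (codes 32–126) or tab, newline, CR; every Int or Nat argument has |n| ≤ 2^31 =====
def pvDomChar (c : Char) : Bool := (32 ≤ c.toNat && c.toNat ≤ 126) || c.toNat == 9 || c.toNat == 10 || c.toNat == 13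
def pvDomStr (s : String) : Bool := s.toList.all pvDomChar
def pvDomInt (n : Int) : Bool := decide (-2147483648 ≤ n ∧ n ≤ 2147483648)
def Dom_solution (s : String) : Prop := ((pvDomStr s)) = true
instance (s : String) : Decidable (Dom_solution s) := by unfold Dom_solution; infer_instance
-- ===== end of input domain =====

-- B replaces A's single-pass stack reduction by repeated collapsing of adjacent
-- equal pairs to a fixpoint (alternative algorithm, not claimed faster).


-- ===== PORT A =====
-- one iteration of A's loop body: the stack is kept top-first
def stepA (stack : List Char) (ch : Char) : List Char :=
  match stack with
  | [] => [ch]                                   -- if not stack: stack.append(ch)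
  | top :: rest => if top == ch then rest        -- if stack[-1] == ch: stack.pop()
                   else ch :: stack              -- else: stack.append(ch)

def solution (s : String) : Int :=
  let stack := s.toList.foldl stepA []
  if stack.isEmpty then 1 else 0

-- ===== PORT B =====
-- the inner index loop of Source B: drop adjacent equal pairs left-to-right, once
def onePassB : List Char → List Char
  | a :: b :: t => if a == b then onePassB t else a :: onePassB (b :: t)
  | l => l

-- the outer while loop of Source B: iterate onePassB while the string shrinks
def loopB (l : List Char) : List Char :=
  let t := onePassB l
  if _h : t.length < l.length then loopB t else l
termination_by l.length

def solution_alt (s : String) : Int :=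
  let r := loopB s.toList
  if r.isEmpty then 1 else 0

-- ===== PRECONDITION & SPEC =====
def Spec_solution (s : String) (out : Int) : Prop := out = solution_alt s
instance (s : String) (out : Int) : Decidable (Spec_solution s out) := by unfold Spec_solution; infer_instance

-- ===== CLAIM (what is proved, stated in full; the proofs are below) =====
def Claim_equal_solution : Prop := ∀ (s : String), Dom_solution s → Spec_solution s (solution s)

-- ===== LEMMAS AND PROOFS =====

theorem onePassB_len_le : ∀ (l : List Char), (onePassB l).length ≤ l.length
  | [] => by simp [onePassB]
  | [a] => by simp [onePassB]
  | a :: b :: t => by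
      simp only [onePassB]
      split
      · have := onePassB_len_le t; simp; omega
      · have := onePassB_len_le (b :: t); simp at this ⊢; omega


-- A's stack never holds two equal adjacent characters
theorem stepA_chain {st : List Char} (h : st.IsChain (· ≠ ·)) (ch : Char) :
    (stepA st ch).IsChain (· ≠ ·) := by
  match st with
  | [] => simp [stepA]
  | top :: rest =>
      simp only [stepA]
      split
      · exact h.tail
      · rename_i hne
        exact List.isChain_cons_cons.mpr ⟨Ne.symm (by simpa using (beq_iff_eq.not.mp hne)), h⟩

-- on a duplicate-free stack, feeding the same character twice is a no-op
theorem stepA_stepA {st : List Char} (h : st.IsChain (· ≠ ·)) (a : Char) :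
    stepA (stepA st a) a = st := by
  match st with
  | [] => simp [stepA]
  | b :: r =>
      by_cases hba : b = a
      · subst hba
        simp only [stepA, beq_self_eq_true, if_true]
        match r, h with
        | [], _ => simp
        | c :: r', h =>
            have hcb : b ≠ c := (List.isChain_cons_cons.mp h).1
            simp [Ne.symm hcb |> beq_eq_false_iff_ne.mpr]
      · simp [stepA, beq_eq_false_iff_ne.mpr hba]

-- collapsing one pass of adjacent pairs does not change A's fold
theorem foldl_onePassB : ∀ (l : List Char) (st : List Char),
    st.IsChain (· ≠ ·) →
    (onePassB l).foldl stepA st = l.foldl stepA st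
  | [], st, _ => by simp [onePassB]
  | [a], st, _ => by simp [onePassB]
  | a :: b :: t, st, h => by
      simp only [onePassB]
      by_cases hab : a = b
      · subst hab
        simp only [beq_self_eq_true, if_true, List.foldl_cons]
        rw [foldl_onePassB t st h, stepA_stepA h]
      · simp only [beq_eq_false_iff_ne.mpr hab, List.foldl_cons]
        exact foldl_onePassB (b :: t) (stepA st a) (stepA_chain h a)
termination_by l => l.length

-- the whole fixpoint loop does not change A's fold
theorem foldl_loopB (l : List Char) :
    (loopB l).foldl stepA [] = l.foldl stepA [] := by
  rw [loopB]
  split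
  · rw [foldl_loopB (onePassB l), foldl_onePassB l [] (by simp)]
  · rfl
termination_by l.length

-- a fixpoint of onePassB has no adjacent equal pair
theorem fix_chain : ∀ (l : List Char),
    ¬ (onePassB l).length < l.length → l.IsChain (· ≠ ·)
  | [] , _ => by simp
  | [a], _ => by simp
  | a :: b :: t, h => by
      by_cases hab : a = b
      · exfalso
        subst hab
        simp only [onePassB, beq_self_eq_true, if_true] at h
        have := onePassB_len_le t
        simp at h; omega
      · simp only [onePassB, beq_eq_false_iff_ne.mpr hab] at h
        have hle := onePassB_len_le (b :: t)
        have h' : ¬ (onePassB (b :: t)).length < (b :: t).length := by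
          simp at h ⊢; omega
        exact List.isChain_cons_cons.mpr ⟨hab, fix_chain (b :: t) h'⟩

-- on a string with no adjacent equal pair, A's stack just accumulates
theorem foldl_of_chain : ∀ (l : List Char) (st : List Char),
    (st = [] ∨ ∀ c ∈ l.head?, st.head? ≠ some c) → l.IsChain (· ≠ ·) →
    l.foldl stepA st = l.reverse ++ st
  | [], st, _, _ => by simp
  | a :: t, st, hc, h => by
      have hstep : stepA st a = a :: st := by
        match st, hc with
        | [], _ => simp [stepA]
        | b :: r, hc =>
            have : b ≠ a := by
              rcases hc with h' | h'
              · exact absurd h' (by simp)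
              · have := h' a (by simp); simpa using this
            simp [stepA, beq_eq_false_iff_ne.mpr this]
      simp only [List.foldl_cons, hstep]
      rw [foldl_of_chain t (a :: st) ?_ h.tail]
      · simp
      · right
        intro c hc'
        match t, hc' with
        | c :: t', rfl =>
            have : a ≠ c := (List.isChain_cons_cons.mp h).1
            simpa using this

theorem loopB_fix (l : List Char) :
    ¬ (onePassB (loopB l)).length < (loopB l).length := by
  rw [loopB]
  split
  · exact loopB_fix (onePassB l)
  · assumption
termination_by l.length

-- ===== VERDICT (by name: the statement is the Claim_ definition above) =====
theorem solution_spec : Claim_equal_solution := by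
  intro s _
  unfold Spec_solution solution solution_alt
  have h1 := foldl_loopB s.toList
  have h2 := fix_chain (loopB s.toList) (loopB_fix s.toList)
  have h3 := foldl_of_chain (loopB s.toList) [] (Or.inl rfl) h2
  simp only [← h1, h3, List.append_nil]
  rcases h : loopB s.toList with _ | ⟨a, t⟩ <;> simp
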